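-- pv_equiv track=rewrite | github.com/rasraz/min-projects | ProblemـSolving/issue3_Polite_robots/bot_language.py | language
-- ===== SOURCE A (Python) =====
-- def language(value):
--     lengh=len(value)/2
--     if lengh==int(lengh):
--         for i in range(0,int(lengh)):
--             slice=value[(2*i):(2*i)+2]
--             if slice[0]==slice[1]:continue
--             else:return 'Nist'
--         return 'Hast'
--     else:
--         return 'Nist'
-- ===== SOURCE B (Python) =====
-- def language(value):
--     return 'Hast' if value[::2] == value[1::2] else 'Nist'
-- ===== Notes on version B (the rewrite author's own statement) =====
-- stated objective: simpler
-- what changed: Replaces the explicit per-pair loop with early exit plus a separate even-length test by building the even- and odd-indexed interleaved slices and comparing them once as whole strings.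
import Mathlib
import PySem

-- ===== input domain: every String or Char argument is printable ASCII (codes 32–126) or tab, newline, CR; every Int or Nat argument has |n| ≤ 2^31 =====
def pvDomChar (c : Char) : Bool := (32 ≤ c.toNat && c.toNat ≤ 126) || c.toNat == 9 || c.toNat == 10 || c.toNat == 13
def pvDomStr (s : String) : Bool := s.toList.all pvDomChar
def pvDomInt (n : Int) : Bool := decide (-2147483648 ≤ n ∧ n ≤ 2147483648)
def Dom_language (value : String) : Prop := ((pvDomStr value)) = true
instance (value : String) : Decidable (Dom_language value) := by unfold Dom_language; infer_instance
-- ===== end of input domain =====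

-- B replaces A's per-pair loop and even-length test by comparing the even- and odd-indexed slices as whole strings (simpler).


-- ===== PORT A =====
-- the for-loop over i, taking value[2i:2i+2] and comparing its two chars, consumed two chars per step:
def pvLoopA : List Char → String
  | a :: b :: rest => if a = b then pvLoopA rest else "Nist"
  | _ => "Hast"

-- 'lengh == int(lengh)' on len/2 is exactly the even-length test (exact for ints of this size)
def language (value : String) : String :=
  if value.toList.length % 2 = 0 then pvLoopA value.toList else "Nist"

-- ===== PORT B =====
-- value[::2] / value[1::2]: extended slice with step 2, ported by hand (exact: every second char)
def pvEvery2 : List Char → List Char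
  | [] => []
  | [a] => [a]
  | a :: _ :: rest => a :: pvEvery2 rest

def language_alt (value : String) : String :=
  if pvEvery2 value.toList = pvEvery2 value.toList.tail then "Hast" else "Nist"

-- ===== PRECONDITION & SPEC =====
def Spec_language (value : String) (out : String) : Prop := out = language_alt value
instance (value : String) (out : String) : Decidable (Spec_language value out) := by unfold Spec_language; infer_instance

-- ===== CLAIM (what is proved, stated in full; the proofs are below) =====
def Claim_equal_language : Prop := ∀ (value : String), Dom_language value → Spec_language value (language value)

-- ===== LEMMAS AND PROOFS =====
theorem pvEvery2_cons (x : Char) (t : List Char) : pvEvery2 (x :: t) = x :: pvEvery2 t.tail := by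
  cases t <;> simp [pvEvery2]

theorem pvEvery2_length (l : List Char) : (pvEvery2 l).length = (l.length + 1) / 2 := by
  induction l using pvEvery2.induct with
  | case1 => simp [pvEvery2]
  | case2 a => simp [pvEvery2]
  | case3 a b rest ih => simp [pvEvery2, ih]; omega

theorem loopA_even (l : List Char) (h : l.length % 2 = 0) :
    pvLoopA l = (if pvEvery2 l = pvEvery2 l.tail then "Hast" else "Nist") := by
  induction l using pvEvery2.induct with
  | case1 => simp [pvLoopA, pvEvery2]
  | case2 a => simp at h
  | case3 a b rest ih =>
      have hr : rest.length % 2 = 0 := by simp at h; omega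
      simp only [pvEvery2_cons, List.tail_cons, pvLoopA, List.cons.injEq]
      by_cases hab : a = b
      · simp [hab, ih hr]
      · simp [hab]

-- ===== VERDICT (by name: the statement is the Claim_ definition above) =====
theorem language_spec : Claim_equal_language := by
  intro value _
  unfold Spec_language language language_alt
  by_cases h : value.toList.length % 2 = 0
  · simp only [h, if_true, loopA_even _ h]
  · have h1 := pvEvery2_length value.toList
    have h2 := pvEvery2_length value.toList.tail
    have hne : pvEvery2 value.toList ≠ pvEvery2 value.toList.tail := by
      intro he
      have hl := congrArg List.length he
      rw [h1, h2, List.length_tail] at hl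
      omega
    rw [if_neg h, if_neg hne]
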